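-- pv_equiv track=rewrite | github.com/shkim816/acnn_speaker_recog | train_model.py | get_label_dic
-- ===== SOURCE A (Python) =====
-- def get_label_dic(l_utt_train):
--     d_label = {}
--     idx_counter = 0
--     for utt in l_utt_train:
--         spk = utt.split('/')[0]
--         if spk not in d_label:
--             d_label[spk] = idx_counter
--             idx_counter += 1
--
--     return d_label
-- ===== SOURCE B (Python) =====
-- def get_label_dic(l_utt_train):
--     # last write wins: scanning the pairs back-to-front leaves each speaker's
--     # FIRST-occurrence position as its stored value, with no membership test
--     first = {}
--     for i, utt in reversed(list(enumerate(l_utt_train))):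
--         first[utt.split('/')[0]] = i
--     order = sorted(first, key=first.get)
--     return {spk: label for label, spk in enumerate(order)}
-- ===== Notes on version B (the rewrite author's own statement) =====
-- stated objective: alternative
-- what changed: Replaces the membership-guarded counter loop with a sort-based pipeline: a reversed overwrite pass records each speaker's first-occurrence index with no membership test, then the keys are sorted by that index and ranked with enumerate.
import Mathlib
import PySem

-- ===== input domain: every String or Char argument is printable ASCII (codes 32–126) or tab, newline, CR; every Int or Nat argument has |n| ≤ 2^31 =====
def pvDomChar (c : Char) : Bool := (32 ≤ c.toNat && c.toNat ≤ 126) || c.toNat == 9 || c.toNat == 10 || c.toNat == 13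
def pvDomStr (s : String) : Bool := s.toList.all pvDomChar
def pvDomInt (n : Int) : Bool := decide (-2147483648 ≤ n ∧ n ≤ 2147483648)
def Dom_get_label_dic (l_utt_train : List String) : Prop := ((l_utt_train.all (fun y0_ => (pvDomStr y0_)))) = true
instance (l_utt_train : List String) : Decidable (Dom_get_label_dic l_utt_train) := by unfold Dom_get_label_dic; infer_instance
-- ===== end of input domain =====

-- B drops A's membership-guarded counter loop: it records first-occurrence indices by plain
-- overwriting in a reversed pass, then sorts the keys by that index and enumerates ranks.

-- utt.split('/')[0]; the separator "/" is nonempty so split? is some, and split never returns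
-- an empty list, so index 0 never raises: the getD defaults are unreachable
def pvSpk (utt : String) : String :=
  PySem.List.pyGetD ((PySem.Str.split? utt "/").getD []) 0 ""

-- ===== PORT A =====
def get_label_dic (l_utt_train : List String) : List (String × Int) :=
  (l_utt_train.foldl
    (fun (s : PySem.Dict String Int × Int) utt =>
      let spk := pvSpk utt
      if s.1.contains spk then s else (s.1.insert spk s.2, s.2 + 1))
    (PySem.Dict.empty, 0)).1.items

-- ===== PORT B =====
def get_label_dic_alt (l_utt_train : List String) : List (String × Int) :=
  -- for i, utt in reversed(list(enumerate(l_utt_train))): first[utt.split('/')[0]] = i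
  let first := ((PySem.List.enumerate l_utt_train).reverse).foldl
    (fun (d : PySem.Dict String Int) p => d.insert (pvSpk p.2) p.1) PySem.Dict.empty
  -- sorted(first, key=first.get); every key is present, so first.get k is its value
  let order := PySem.List.sorted first.keys (fun k => first.getD k 0)
  -- {spk: label for label, spk in enumerate(order)}
  ((PySem.List.enumerate order).foldl
    (fun (d : PySem.Dict String Int) p => d.insert p.2 p.1) PySem.Dict.empty).items

-- ===== PRECONDITION & SPEC =====
def Spec_get_label_dic (l_utt_train : List String) (out : List (String × Int)) : Prop := out = get_label_dic_alt l_utt_train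
instance (l_utt_train : List String) (out : List (String × Int)) : Decidable (Spec_get_label_dic l_utt_train out) := by unfold Spec_get_label_dic; infer_instance

-- ===== CLAIM (what is proved, stated in full; the proofs are below) =====
def Claim_equal_get_label_dic : Prop := ∀ (l_utt_train : List String), Dom_get_label_dic l_utt_train → Spec_get_label_dic l_utt_train (get_label_dic l_utt_train)

-- ===== LEMMAS AND PROOFS =====

-- canonical value: the distinct keys, in first-occurrence order, paired with their position
def pvDictOf (ks : List String) : PySem.Dict String Int :=
  PySem.Dict.mk ((PySem.List.enumerate (PySem.Set.ofList ks)).map (fun p => (p.2, p.1)))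

lemma pvOfList_snoc (ks : List String) (x : String) :
    PySem.Set.ofList (ks ++ [x]) =
      if x ∈ ks then PySem.Set.ofList ks else PySem.Set.ofList ks ++ [x] := by
  rw [PySem.Set.ofList_eq_foldl, List.foldl_append, ← PySem.Set.ofList_eq_foldl]
  show PySem.Set.add (PySem.Set.ofList ks) x = _
  by_cases h : x ∈ ks
  · simp [PySem.Set.add, h, PySem.Set.mem_ofList]
  · simp [PySem.Set.add, h, PySem.Set.mem_ofList]

lemma pvDictOf_keys (ks : List String) : (pvDictOf ks).keys = PySem.Set.ofList ks := by
  simp [pvDictOf, PySem.Dict.keys, List.map_map, Function.comp_def,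
    PySem.List.map_snd_enumerate]

lemma pvDictOf_contains (ks : List String) (x : String) :
    (pvDictOf ks).contains x = decide (x ∈ ks) := by
  rw [PySem.Dict.contains_eq_decide_mem_keys, pvDictOf_keys]
  simp [PySem.Set.mem_ofList]

lemma pvDictOf_snoc (ks : List String) (x : String) :
    pvDictOf (ks ++ [x]) =
      if x ∈ ks then pvDictOf ks
      else (pvDictOf ks).insert x ((PySem.Set.ofList ks).length : Int) := by
  by_cases h : x ∈ ks
  · simp [pvDictOf, pvOfList_snoc, h]
  · have hc : (pvDictOf ks).contains x = false := by
      rw [pvDictOf_contains]; simpa using h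
    apply PySem.Dict.ext
    rw [if_neg h, PySem.Dict.items_insert_of_not_contains _ _ hc]
    simp [pvDictOf, pvOfList_snoc, h, PySem.List.enumerate_append]

lemma pvA_invariant (ks : List String) :
    ks.foldl
      (fun (s : PySem.Dict String Int × Int) k =>
        if s.1.contains k then s else (s.1.insert k s.2, s.2 + 1))
      (PySem.Dict.empty, 0)
    = (pvDictOf ks, ((PySem.Set.ofList ks).length : Int)) := by
  induction ks using List.reverseRecOn with
  | nil => rfl
  | append_singleton ks x ih =>
    rw [List.foldl_append, ih]
    simp only [List.foldl_cons, List.foldl_nil, pvDictOf_contains, pvDictOf_snoc,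
      pvOfList_snoc]
    by_cases h : x ∈ ks
    · simp [h]
    · simp [h]

lemma pvA_eq (l : List String) : get_label_dic l = (pvDictOf (l.map pvSpk)).items := by
  unfold get_label_dic
  rw [show (List.foldl (fun (s : PySem.Dict String Int × Int) utt =>
        let spk := pvSpk utt
        if s.1.contains spk then s else (s.1.insert spk s.2, s.2 + 1)) (PySem.Dict.empty, 0) l)
      = ((l.map pvSpk).foldl (fun (s : PySem.Dict String Int × Int) k =>
        if s.1.contains k then s else (s.1.insert k s.2, s.2 + 1)) (PySem.Dict.empty, 0))
      from by exact (List.foldl_map (g := fun (s : PySem.Dict String Int × Int) k =>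
          if s.1.contains k then s else (s.1.insert k s.2, s.2 + 1))).symm]
  rw [pvA_invariant]

-- B's first loop, after pulling the key extraction through enumerate/reverse
def pvFoldF (ks : List String) (s : Int) (d : PySem.Dict String Int) : PySem.Dict String Int :=
  ((PySem.List.enumerate ks s).reverse).foldl
    (fun (d : PySem.Dict String Int) p => d.insert p.2 p.1) d

lemma pvFoldF_cons (x : String) (ks : List String) (s : Int) (d : PySem.Dict String Int) :
    pvFoldF (x :: ks) s d = (pvFoldF ks (s + 1) d).insert x s := by
  simp [pvFoldF, PySem.List.enumerate, List.foldl_append]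

lemma pvFoldF_getD (ks : List String) :
    ∀ (s : Int) (d : PySem.Dict String Int) (k : String),
      (pvFoldF ks s d).getD k 0 =
        if k ∈ ks then s + (ks.idxOf k : Int) else d.getD k 0 := by
  induction ks with
  | nil => intro s d k; simp [pvFoldF, PySem.List.enumerate]
  | cons x t ih =>
    intro s d k
    rw [pvFoldF_cons, PySem.Dict.getD_insert, ih]
    by_cases hx : k = x
    · simp [hx, List.idxOf_cons_self]
    · rw [if_neg hx, List.idxOf_cons_ne _ (fun e => hx e.symm)]
      by_cases ht : k ∈ t
      · simp [ht, hx]; omega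
      · simp [ht, hx]

lemma pvFoldF_mem_keys (ks : List String) :
    ∀ (s : Int) (d : PySem.Dict String Int) (k : String),
      k ∈ (pvFoldF ks s d).keys ↔ k ∈ ks ∨ k ∈ d.keys := by
  induction ks with
  | nil => intro s d k; simp [pvFoldF, PySem.List.enumerate]
  | cons x t ih =>
    intro s d k
    rw [pvFoldF_cons, PySem.Dict.mem_keys_insert, ih]
    simp [or_assoc]

lemma pvFoldF_nodup_keys (ks : List String) :
    ∀ (s : Int) (d : PySem.Dict String Int), d.keys.Nodup → (pvFoldF ks s d).keys.Nodup := by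
  induction ks with
  | nil => intro s d h; simpa [pvFoldF, PySem.List.enumerate] using h
  | cons x t ih =>
    intro s d h
    rw [pvFoldF_cons]
    exact PySem.Dict.nodup_keys_insert _ _ _ (ih _ _ h)

lemma pvIdxOf_snoc_of_mem (ks : List String) (x k : String) (h : k ∈ ks) :
    (ks ++ [x]).idxOf k = ks.idxOf k := List.idxOf_append_of_mem h

lemma pvIdxOf_snoc_self (ks : List String) (x : String) (h : x ∉ ks) :
    (ks ++ [x]).idxOf x = ks.length := by
  induction ks with
  | nil => simp
  | cons a t ih =>
    simp at h
    rw [List.cons_append, List.idxOf_cons_ne _ (fun e => h.1 e.symm), ih h.2]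
    simp

lemma pvOfList_pairwise_idxOf (ks : List String) :
    (PySem.Set.ofList ks).Pairwise (fun a b => ks.idxOf a < ks.idxOf b) := by
  induction ks using List.reverseRecOn with
  | nil => simp
  | append_singleton ks x ih =>
    rw [pvOfList_snoc]
    by_cases h : x ∈ ks
    · rw [if_pos h]
      refine ih.imp_of_mem ?_
      intro a b ha hb hab
      rw [pvIdxOf_snoc_of_mem ks x a ((PySem.Set.mem_ofList ks a).mp ha),
        pvIdxOf_snoc_of_mem ks x b ((PySem.Set.mem_ofList ks b).mp hb)]
      exact hab
    · rw [if_neg h]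
      rw [List.pairwise_append]
      refine ⟨ih.imp_of_mem ?_, by simp, ?_⟩
      · intro a b ha hb hab
        rw [pvIdxOf_snoc_of_mem ks x a ((PySem.Set.mem_ofList ks a).mp ha),
          pvIdxOf_snoc_of_mem ks x b ((PySem.Set.mem_ofList ks b).mp hb)]
        exact hab
      · intro a ha b hb
        rw [List.mem_singleton] at hb
        rw [hb]
        rw [pvIdxOf_snoc_of_mem ks x a ((PySem.Set.mem_ofList ks a).mp ha),
          pvIdxOf_snoc_self ks x h]
        exact List.idxOf_lt_length_of_mem ((PySem.Set.mem_ofList ks a).mp ha)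

lemma pvEnumerate_map (f : String → String) (l : List String) :
    ∀ s : Int, PySem.List.enumerate (l.map f) s
      = (PySem.List.enumerate l s).map (fun p => (p.1, f p.2)) := by
  induction l with
  | nil => intro s; rfl
  | cons x t ih => intro s; simp [PySem.List.enumerate, ih]

lemma pvEnumInsertFold (os : List String) (h : os.Nodup) :
    ((PySem.List.enumerate os).foldl
      (fun (d : PySem.Dict String Int) p => d.insert p.2 p.1) PySem.Dict.empty).items
    = (PySem.List.enumerate os).map (fun p => (p.2, p.1)) := by
  induction os using List.reverseRecOn with
  | nil => rfl
  | append_singleton os x ih =>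
    have hn : os.Nodup := (List.nodup_append.mp h).1
    have hx : x ∉ os := by
      intro hm
      have hd := (List.nodup_append.mp h).2.2
      exact hd x hm x (List.mem_singleton_self x) rfl
    have hkeys : ((PySem.List.enumerate os).foldl
        (fun (d : PySem.Dict String Int) p => d.insert p.2 p.1) PySem.Dict.empty).keys = os := by
      rw [PySem.Dict.keys, ih hn, List.map_map]
      simp [Function.comp_def, PySem.List.map_snd_enumerate]
    have hc : ((PySem.List.enumerate os).foldl
        (fun (d : PySem.Dict String Int) p => d.insert p.2 p.1) PySem.Dict.empty).contains x
        = false := by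
      rw [PySem.Dict.contains_eq_decide_mem_keys, hkeys]
      simpa using hx
    rw [PySem.List.enumerate_append, List.foldl_append]
    simp only [PySem.List.enumerate, List.foldl_cons, List.foldl_nil]
    rw [PySem.Dict.items_insert_of_not_contains _ _ hc, ih hn, List.map_append]
    rfl

lemma pvB_eq (l : List String) : get_label_dic_alt l = (pvDictOf (l.map pvSpk)).items := by
  unfold get_label_dic_alt
  have h1 : ((PySem.List.enumerate l).reverse).foldl
      (fun (d : PySem.Dict String Int) p => d.insert (pvSpk p.2) p.1) PySem.Dict.empty
      = pvFoldF (l.map pvSpk) 0 PySem.Dict.empty := by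
    rw [pvFoldF, pvEnumerate_map, ← List.map_reverse,
      List.foldl_map (g := fun (d : PySem.Dict String Int) (p : Int × String) =>
        d.insert p.2 p.1)]
  simp only [h1]
  have hperm : (PySem.Set.ofList (l.map pvSpk)).Perm
      ((pvFoldF (l.map pvSpk) 0 PySem.Dict.empty).keys) := by
    refine (List.perm_ext_iff_of_nodup (PySem.Set.nodup_ofList _) ?_).mpr ?_
    · exact pvFoldF_nodup_keys _ _ _ (by rw [PySem.Dict.keys_empty]; exact List.nodup_nil)
    · intro k
      rw [PySem.Set.mem_ofList, pvFoldF_mem_keys, PySem.Dict.keys_empty]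
      simp
  have hpair : (PySem.Set.ofList (l.map pvSpk)).Pairwise
      (fun a b => (pvFoldF (l.map pvSpk) 0 PySem.Dict.empty).getD a 0
        < (pvFoldF (l.map pvSpk) 0 PySem.Dict.empty).getD b 0) := by
    refine (pvOfList_pairwise_idxOf (l.map pvSpk)).imp_of_mem ?_
    intro a b ha hb hab
    rw [pvFoldF_getD, pvFoldF_getD,
      if_pos ((PySem.Set.mem_ofList _ a).mp ha), if_pos ((PySem.Set.mem_ofList _ b).mp hb)]
    omega
  rw [PySem.List.sorted_eq_of_perm_of_pairwise_lt _ _ _ hperm hpair]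
  rw [pvEnumInsertFold _ (PySem.Set.nodup_ofList _)]
  rfl

-- ===== VERDICT (by name: the statement is the Claim_ definition above) =====
theorem get_label_dic_spec : Claim_equal_get_label_dic := by
  intro l _
  unfold Spec_get_label_dic
  rw [pvA_eq, pvB_eq]
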